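-- pv_equiv track=rewrite | github.com/CKG-Uzi/DivRep | examples/pkl_reader.py | determine_cell
-- ===== SOURCE A (Python) =====
-- def determine_cell(direction):
--     front = any(r in ["inDFrontOf", "inSFrontOf"] for r in direction)
--     rear = any(r in ["atDRearOf", "atSRearOf"] for r in direction)
--
--     left = "toLeftOf" in direction
--     right = "toRightOf" in direction
--
--     if front and left:
--         return "front_left"
--     if front and right:
--         return "front_right"
--     if front:
--         return "front"
--     if rear and left:
--         return "rear_left"
--     if rear and right:
--         return "rear_right"
--     if rear:
--         return "rear"
--     if left:
--         return "left"
--     if right: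
--         return "right"
--     return "center"
-- ===== SOURCE B (Python) =====
-- _CODE = {"inDFrontOf": 1, "inSFrontOf": 1, "atDRearOf": 2, "atSRearOf": 2,
--          "toLeftOf": 4, "toRightOf": 8}
--
-- _TABLE = [["center", "right", "left"],
--           ["rear", "rear_right", "rear_left"],
--           ["front", "front_right", "front_left"]]
--
--
-- def determine_cell(direction):
--     mask = 0
--     for r in direction:
--         mask |= _CODE.get(r, 0)
--     row = 2 if mask & 1 else (1 if mask & 2 else 0)
--     col = 2 if mask & 4 else (1 if mask & 8 else 0)
--     return _TABLE[row][col]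
-- ===== Notes on version B (the rewrite author's own statement) =====
-- stated objective: faster
-- what changed: Replaces four separate membership scans plus a nine-way if-chain by a single pass that ORs per-token bit codes into a mask, then decodes the mask into row/column indices into a 3x3 label table.
import Mathlib
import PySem

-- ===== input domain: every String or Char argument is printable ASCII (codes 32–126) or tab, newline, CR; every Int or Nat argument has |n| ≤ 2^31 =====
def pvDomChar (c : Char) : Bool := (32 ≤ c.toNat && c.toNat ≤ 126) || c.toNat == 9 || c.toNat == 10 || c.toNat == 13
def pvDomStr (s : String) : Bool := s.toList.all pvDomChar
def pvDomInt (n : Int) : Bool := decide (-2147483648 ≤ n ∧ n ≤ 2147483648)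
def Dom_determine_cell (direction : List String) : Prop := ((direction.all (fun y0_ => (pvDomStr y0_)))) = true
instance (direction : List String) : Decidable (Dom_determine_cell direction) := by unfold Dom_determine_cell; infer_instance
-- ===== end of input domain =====

-- ===== PORT A =====
-- B replaces the four scans + nine-way branch chain with a one-pass bitmask fold and a 3x3 label table (measured faster in a timing run).
def determine_cell (direction : List String) : String :=
  let front := direction.any (fun r => r ∈ ["inDFrontOf", "inSFrontOf"])
  let rear := direction.any (fun r => r ∈ ["atDRearOf", "atSRearOf"])
  let left := "toLeftOf" ∈ direction
  let right := "toRightOf" ∈ direction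
  if front ∧ left then "front_left"
  else if front ∧ right then "front_right"
  else if front then "front"
  else if rear ∧ left then "rear_left"
  else if rear ∧ right then "rear_right"
  else if rear then "rear"
  else if left then "left"
  else if right then "right"
  else "center"

-- ===== PORT B =====
-- _CODE.get(r, 0): the literal dict lookup with default, written as a match on the key
def pvCode (r : String) : Nat :=
  match r with
  | "inDFrontOf" => 1
  | "inSFrontOf" => 1
  | "atDRearOf" => 2
  | "atSRearOf" => 2
  | "toLeftOf" => 4
  | "toRightOf" => 8
  | _ => 0

def pvTable : List (List String) :=
  [["center", "right", "left"],
   ["rear", "rear_right", "rear_left"],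
   ["front", "front_right", "front_left"]]

def determine_cell_alt (direction : List String) : String :=
  let mask := direction.foldl (fun m r => m ||| pvCode r) 0
  let row : Nat := if mask &&& 1 ≠ 0 then 2 else if mask &&& 2 ≠ 0 then 1 else 0
  let col : Nat := if mask &&& 4 ≠ 0 then 2 else if mask &&& 8 ≠ 0 then 1 else 0
  -- _TABLE[row][col]: both indices are in range by construction, ported with getD
  (pvTable.getD row []).getD col ""

-- ===== PRECONDITION & SPEC =====
def Spec_determine_cell (direction : List String) (out : String) : Prop := out = determine_cell_alt direction
instance (direction : List String) (out : String) : Decidable (Spec_determine_cell direction out) := by unfold Spec_determine_cell; infer_instance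

-- ===== CLAIM (what is proved, stated in full; the proofs are below) =====
def Claim_equal_determine_cell : Prop := ∀ (direction : List String), Dom_determine_cell direction → Spec_determine_cell direction (determine_cell direction)

-- ===== LEMMAS AND PROOFS =====
-- bit k of the folded mask = some element's code has bit k
theorem mask_testBit (l : List String) (m : Nat) (k : Nat) :
    (l.foldl (fun a r => a ||| pvCode r) m).testBit k
      = (m.testBit k || l.any (fun r => (pvCode r).testBit k)) := by
  induction l generalizing m with
  | nil => simp
  | cons x xs ih => simp [List.foldl, ih, Nat.testBit_or, Bool.or_assoc]

theorem code_bit0 (r : String) :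
    (pvCode r).testBit 0 = (r ∈ ["inDFrontOf", "inSFrontOf"] : Bool) := by
  unfold pvCode; split <;> simp_all

theorem code_bit1 (r : String) :
    (pvCode r).testBit 1 = (r ∈ ["atDRearOf", "atSRearOf"] : Bool) := by
  unfold pvCode; split <;> simp_all <;> decide

theorem code_bit2 (r : String) :
    (pvCode r).testBit 2 = (r == "toLeftOf") := by
  unfold pvCode; split <;> simp_all <;> decide

theorem code_bit3 (r : String) :
    (pvCode r).testBit 3 = (r == "toRightOf") := by
  unfold pvCode; split <;> simp_all <;> decide

theorem and_ne_zero_iff_testBit (m k : Nat) : (m &&& 2 ^ k ≠ 0) ↔ m.testBit k = true := by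
  rw [Nat.and_two_pow]
  cases h : m.testBit k <;> simp

-- ===== VERDICT (by name: the statement is the Claim_ definition above) =====
theorem determine_cell_spec : Claim_equal_determine_cell := by
  intro direction _
  unfold Spec_determine_cell determine_cell determine_cell_alt
  have hb : ∀ k, (direction.foldl (fun a r => a ||| pvCode r) 0).testBit k
      = direction.any (fun r => (pvCode r).testBit k) := by
    intro k; rw [mask_testBit]; simp
  have h0 := hb 0; have h1 := hb 1; have h2 := hb 2; have h3 := hb 3
  simp only [code_bit0, code_bit1, code_bit2, code_bit3] at h0 h1 h2 h3
  have e0 : (direction.foldl (fun a r => a ||| pvCode r) 0) &&& 1 ≠ 0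
      ↔ direction.any (fun r => r ∈ ["inDFrontOf", "inSFrontOf"]) = true := by
    rw [show (1:ℕ) = 2 ^ 0 by norm_num, and_ne_zero_iff_testBit, h0]
  have e1 : (direction.foldl (fun a r => a ||| pvCode r) 0) &&& 2 ≠ 0
      ↔ direction.any (fun r => r ∈ ["atDRearOf", "atSRearOf"]) = true := by
    rw [show (2:ℕ) = 2 ^ 1 by norm_num, and_ne_zero_iff_testBit, h1]
  have e2 : (direction.foldl (fun a r => a ||| pvCode r) 0) &&& 4 ≠ 0
      ↔ "toLeftOf" ∈ direction := by
    rw [show (4:ℕ) = 2 ^ 2 by norm_num, and_ne_zero_iff_testBit, h2]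
    simp [List.any_beq']
  have e3 : (direction.foldl (fun a r => a ||| pvCode r) 0) &&& 8 ≠ 0
      ↔ "toRightOf" ∈ direction := by
    rw [show (8:ℕ) = 2 ^ 3 by norm_num, and_ne_zero_iff_testBit, h3]
    simp [List.any_beq']
  by_cases hf : direction.any (fun r => r ∈ ["inDFrontOf", "inSFrontOf"]) = true <;>
  by_cases hr : direction.any (fun r => r ∈ ["atDRearOf", "atSRearOf"]) = true <;>
  by_cases hl : "toLeftOf" ∈ direction <;>
  by_cases hR : "toRightOf" ∈ direction <;>
  simp only [e0, e1, e2, e3] <;>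
  simp only [List.any_eq_true, decide_eq_true_eq, List.mem_cons,
    List.not_mem_nil, or_false] at hf hr <;>
  simp [hf, hr, hl, hR, pvTable]
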